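-- pv_equiv track=rewrite | github.com/genglongling/M-APPLE-OS | applications/test_dmu_static.py | drl_liu_heuristic
-- ===== SOURCE A (Python) =====
-- def drl_liu_heuristic(jobs, n_machines):
--     # Schedule jobs by always picking the next available operation with the earliest possible start time
--     n_jobs = len(jobs)
--     n_ops = len(jobs[0])
--     machine_time = [0] * n_machines
--     job_time = [0] * n_jobs
--     op_indices = [0] * n_jobs
--     total_ops = n_jobs * n_ops
--     scheduled = 0
--     while scheduled < total_ops:
--         earliest = float('inf')
--         chosen = -1
--         for j in range(n_jobs):
--             if op_indices[j] < n_ops: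
--                 m, d = jobs[j][op_indices[j]]
--                 ready = max(machine_time[m], job_time[j])
--                 if ready < earliest:
--                     earliest = ready
--                     chosen = j
--         m, d = jobs[chosen][op_indices[chosen]]
--         start = max(machine_time[m], job_time[chosen])
--         machine_time[m] = start + d
--         job_time[chosen] = start + d
--         op_indices[chosen] += 1
--         scheduled += 1
--     return max(job_time)
-- ===== SOURCE B (Python) =====
-- def drl_liu_heuristic(jobs, n_machines):
--     # Shrinking worklist of (job_time, remaining ops); finished jobs leave the
--     # worklist and deposit their completion time; answer = max completion time.
--     n_ops = len(jobs[0])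
--     machine_time = [0] * n_machines
--     pending = []
--     completions = []
--     for ops in jobs:
--         if n_ops:
--             pending.append((0, list(ops[:n_ops])))
--         else:
--             completions.append(0)
--     while pending:
--         i = min(range(len(pending)),
--                 key=lambda k: max(machine_time[pending[k][1][0][0]], pending[k][0]))
--         t, ops = pending[i]
--         m, d = ops[0]
--         finish = max(machine_time[m], t) + d
--         machine_time[m] = finish
--         if len(ops) == 1:
--             completions.append(finish)
--             pending.pop(i)
--         else:
--             pending[i] = (finish, ops[1:])
--     return max(completions)
-- ===== Notes on version B (the rewrite author's own statement) =====
-- stated objective: alternative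
-- what changed: Replaces A's fixed index arrays (op_indices/job_time) and full re-scan of all jobs per round by a shrinking worklist of (job_time, remaining-ops) pairs from which finished jobs are removed, depositing each job's completion time into a completions list whose max is the makespan.
import Mathlib
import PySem

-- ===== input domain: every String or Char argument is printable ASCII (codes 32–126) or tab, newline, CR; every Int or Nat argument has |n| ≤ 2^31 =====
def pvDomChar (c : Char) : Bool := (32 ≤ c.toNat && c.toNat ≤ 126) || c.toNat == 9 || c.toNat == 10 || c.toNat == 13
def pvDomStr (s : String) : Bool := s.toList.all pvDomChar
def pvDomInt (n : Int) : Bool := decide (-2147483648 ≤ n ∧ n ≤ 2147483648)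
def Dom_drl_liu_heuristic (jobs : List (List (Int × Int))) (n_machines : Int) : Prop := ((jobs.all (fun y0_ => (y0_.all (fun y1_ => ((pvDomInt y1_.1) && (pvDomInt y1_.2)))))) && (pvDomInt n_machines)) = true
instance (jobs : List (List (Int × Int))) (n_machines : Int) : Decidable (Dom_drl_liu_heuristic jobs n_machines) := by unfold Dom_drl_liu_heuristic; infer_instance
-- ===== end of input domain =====

-- B replaces A's per-round scan over index/counter arrays by a shrinking worklist of
-- (job_time, remaining-ops) pairs that deposits each job's completion time when the job
-- finishes (objective: alternative decomposition, same asymptotic cost).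

-- ===== PORT A =====
-- inner 'for j in range(n_jobs)' argmin scan; 'earliest = float("inf")' is the 'none' accumulator
def aScan (jobs : List (List (Int × Int))) (machine_time job_time op_indices : List Int)
    (n_ops : Int) (n_jobs : Int) : Option Int × Int :=
  (PySem.List.pyRange 0 n_jobs 1).foldl (fun acc j =>
    if PySem.List.pyGetD op_indices j 0 < n_ops then
      let op := PySem.List.pyGetD (PySem.List.pyGetD jobs j []) (PySem.List.pyGetD op_indices j 0) (0, 0)
      let ready := max (PySem.List.pyGetD machine_time op.1 0) (PySem.List.pyGetD job_time j 0)
      match acc.1 with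
      | none => (some ready, j)
      | some e => if ready < e then (some ready, j) else acc
    else acc) (none, -1)

-- 'while scheduled < total_ops' as recursion on the remaining count total_ops - scheduled
def aLoop (jobs : List (List (Int × Int))) (n_ops : Int) (n_jobs : Int) :
    Nat → List Int → List Int → List Int → List Int
  | 0, _, job_time, _ => job_time
  | fuel + 1, machine_time, job_time, op_indices =>
    let chosen := (aScan jobs machine_time job_time op_indices n_ops n_jobs).2
    let op := PySem.List.pyGetD (PySem.List.pyGetD jobs chosen []) (PySem.List.pyGetD op_indices chosen 0) (0, 0)
    let start := max (PySem.List.pyGetD machine_time op.1 0) (PySem.List.pyGetD job_time chosen 0)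
    aLoop jobs n_ops n_jobs fuel
      (PySem.List.pySetD machine_time op.1 (start + op.2))
      (PySem.List.pySetD job_time chosen (start + op.2))
      (PySem.List.pySetD op_indices chosen (PySem.List.pyGetD op_indices chosen 0 + 1))

def drl_liu_heuristic (jobs : List (List (Int × Int))) (n_machines : Int) : Int :=
  let n_jobs : Int := PySem.List.len jobs
  let n_ops : Int := PySem.List.len (PySem.List.pyGetD jobs 0 [])   -- jobs[0]; IndexError on [] excluded by Pre_
  let machine_time := List.replicate n_machines.toNat (0 : Int)
  let job_time := List.replicate jobs.length (0 : Int)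
  let op_indices := List.replicate jobs.length (0 : Int)
  let total_ops : Int := n_jobs * n_ops
  let jt := aLoop jobs n_ops n_jobs total_ops.toNat machine_time job_time op_indices
  (PySem.List.max? jt (fun x => x)).getD 0

-- ===== PORT B =====
-- key of pending[k]: earliest possible start of its next operation
def bKey (machine_time : List Int) (pending : List (Int × List (Int × Int))) (k : Int) : Int :=
  let p := PySem.List.pyGetD pending k (0, [])
  max (PySem.List.pyGetD machine_time ((p.2.headD (0, 0)).1) 0) p.1

def bMeasure (pending : List (Int × List (Int × Int))) : Nat :=
  (pending.map (fun p => p.2.length)).sum + pending.length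

lemma bMeasure_eraseIdx (pending : List (Int × List (Int × Int))) (n : Nat)
    (h : n < pending.length) : bMeasure (pending.eraseIdx n) < bMeasure pending := by
  induction pending generalizing n with
  | nil => simp at h
  | cons p l ih =>
    cases n with
    | zero => simp [bMeasure]; omega
    | succ n =>
      have := ih n (by simpa using h)
      simp [bMeasure, List.eraseIdx_cons_succ] at *
      omega

lemma bMeasure_set (pending : List (Int × List (Int × Int))) (n : Nat) (t fin : Int)
    (ops : List (Int × Int)) (rest : List (Int × Int))
    (hp : pending[n]? = some (t, ops)) (hops : ops.length = rest.length + 1) :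
    bMeasure (pending.set n (fin, rest)) < bMeasure pending := by
  induction pending generalizing n with
  | nil => simp at hp
  | cons p l ih =>
    cases n with
    | zero =>
      simp at hp
      simp [bMeasure, hp, hops]
    | succ n =>
      have := ih n (by simpa using hp)
      simp [bMeasure] at *
      omega

-- 'while pending' loop of B; the two inner guards are totality guards only:
-- i always indexes pending (min over range(len(pending))), and worklist entries
-- always hold a nonempty remaining-ops list
def bLoop (machine_time : List Int) (pending : List (Int × List (Int × Int)))
    (completions : List Int) : List Int :=
  if pending.isEmpty then completions
  else
    let i : Int := (PySem.List.min? (PySem.List.pyRange 0 (PySem.List.len pending) 1)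
        (bKey machine_time pending)).getD 0
    if hk : i.toNat < pending.length then
      let p := pending.getD i.toNat (0, [])
      if hne : p.2.isEmpty then completions
      else
        let op := p.2.headD (0, 0)
        let fin := max (PySem.List.pyGetD machine_time op.1 0) p.1 + op.2
        let mt' := PySem.List.pySetD machine_time op.1 fin
        if p.2.length == 1 then
          bLoop mt' (pending.eraseIdx i.toNat) (completions ++ [fin])
        else
          bLoop mt' (pending.set i.toNat (fin, p.2.tail)) completions
    else completions
  termination_by bMeasure pending
  decreasing_by
  · exact bMeasure_eraseIdx _ _ hk
  · refine bMeasure_set pending i.toNat p.1 _ p.2 p.2.tail ?_ ?_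
    · rw [List.getElem?_eq_getElem hk]
      show _ = some p
      congr 1
      show pending[i.toNat] = pending.getD i.toNat (0, [])
      rw [List.getD_eq_getElem?_getD, List.getElem?_eq_getElem hk]
      rfl
    · have : p.2 ≠ [] := by simpa using hne
      cases hp2 : p.2 with
      | nil => exact absurd hp2 this
      | cons a t => simp

def drl_liu_heuristic_alt (jobs : List (List (Int × Int))) (n_machines : Int) : Int :=
  let n_ops : Int := PySem.List.len (PySem.List.pyGetD jobs 0 [])
  let machine_time := List.replicate n_machines.toNat (0 : Int)
  let init := jobs.foldl (fun (acc : List (Int × List (Int × Int)) × List Int) ops =>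
    if n_ops ≠ 0 then (acc.1 ++ [(0, PySem.List.slice ops none (some n_ops))], acc.2)
    else (acc.1, acc.2 ++ [(0 : Int)])) ([], [])
  let comps := bLoop machine_time init.1 init.2
  (PySem.List.max? comps (fun x => x)).getD 0

-- ===== PRECONDITION & SPEC =====
-- Pre_ is exactly where Python A returns normally: jobs nonempty (else jobs[0] raises IndexError),
-- every job at least n_ops = len(jobs[0]) operations long (a shorter job's index overruns,
-- IndexError), and every scheduled operation's machine index valid for machine_time
-- (else IndexError); it excludes no input on which A returns.
def Pre_drl_liu_heuristic (jobs : List (List (Int × Int))) (n_machines : Int) : Prop :=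
  jobs ≠ [] ∧ ∀ job ∈ jobs, (jobs.headD []).length ≤ job.length ∧
    ∀ op ∈ job.take (jobs.headD []).length, -n_machines ≤ op.1 ∧ op.1 < n_machines
instance (jobs : List (List (Int × Int))) (n_machines : Int) : Decidable (Pre_drl_liu_heuristic jobs n_machines) := by
  unfold Pre_drl_liu_heuristic; infer_instance

def pvWitness_drl_liu_heuristic : (List (List (Int × Int))) × Int :=
  ([[(0, 3), (1, 2)], [(1, 2), (0, 4)]], 2)

def Spec_drl_liu_heuristic (jobs : List (List (Int × Int))) (n_machines : Int) (out : Int) : Prop := out = drl_liu_heuristic_alt jobs n_machines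
instance (jobs : List (List (Int × Int))) (n_machines : Int) (out : Int) : Decidable (Spec_drl_liu_heuristic jobs n_machines out) := by unfold Spec_drl_liu_heuristic; infer_instance

-- ===== CLAIM (what is proved, stated in full; the proofs are below) =====
def Claim_equal_drl_liu_heuristic : Prop := ∀ (jobs : List (List (Int × Int))) (n_machines : Int), Dom_drl_liu_heuristic jobs n_machines → Pre_drl_liu_heuristic jobs n_machines → Spec_drl_liu_heuristic jobs n_machines (drl_liu_heuristic jobs n_machines)

-- ===== LEMMAS AND PROOFS =====

-- abstract view of A's state: P = ops per job, U = unfinished job ids (in order),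
-- pvPend = B's worklist as a function of A's state, pvFinVals = completion times of finished jobs
def pvP (jobs : List (List (Int × Int))) : Nat := (jobs.headD []).length

def pvU (jobs : List (List (Int × Int))) (oi : List Int) : List Nat :=
  (List.range jobs.length).filter (fun j => decide (oi.getD j 0 < (pvP jobs : Int)))

def pvF (jobs : List (List (Int × Int))) (oi : List Int) : List Nat :=
  (List.range jobs.length).filter (fun j => !decide (oi.getD j 0 < (pvP jobs : Int)))

def pvEntry (jobs : List (List (Int × Int))) (jt oi : List Int) (j : Nat) : Int × List (Int × Int) :=
  (jt.getD j 0, ((jobs.getD j []).take (pvP jobs)).drop (oi.getD j 0).toNat)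

def pvPend (jobs : List (List (Int × Int))) (jt oi : List Int) : List (Int × List (Int × Int)) :=
  (pvU jobs oi).map (pvEntry jobs jt oi)

def pvFinVals (jobs : List (List (Int × Int))) (jt oi : List Int) : List Int :=
  (pvF jobs oi).map (fun j => jt.getD j 0)

def pvKey (jobs : List (List (Int × Int))) (mt jt oi : List Int) (j : Nat) : Int :=
  max (PySem.List.pyGetD mt ((pvEntry jobs jt oi j).2.headD (0, 0)).1 0) (jt.getD j 0)

def pvRem (jobs : List (List (Int × Int))) (oi : List Int) : Nat :=
  ((List.range jobs.length).map (fun j => pvP jobs - (oi.getD j 0).toNat)).sum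

-- ----- generic list facts -----

lemma pv_decomp {α : Type} (l : List α) (n : Nat) (h : n < l.length) :
    l = l.take n ++ l[n] :: l.drop (n + 1) := by
  conv_lhs => rw [← List.take_append_drop n l]
  rw [List.getElem_cons_drop h]

lemma pv_split {α : Type} (l : List α) (hl : l.Nodup) (k : Nat) (hk : k < l.length) :
    l[k] ∉ l.take k ∧ l[k] ∉ l.drop (k + 1) := by
  constructor
  · intro h
    obtain ⟨i, hi, heq⟩ := List.mem_iff_getElem.mp h
    rw [List.getElem_take] at heq
    have : i = k := (List.Nodup.getElem_inj_iff hl).mp heq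
    have := List.length_take_le k l
    omega
  · intro h
    obtain ⟨i, hi, heq⟩ := List.mem_iff_getElem.mp h
    rw [List.getElem_drop] at heq
    have : k + 1 + i = k := (List.Nodup.getElem_inj_iff hl).mp heq
    omega

lemma pv_eraseIdx_eq_take_drop {α : Type} (l : List α) (k : Nat) :
    l.eraseIdx k = l.take k ++ l.drop (k + 1) :=
  List.eraseIdx_eq_take_drop_succ l k

lemma pv_map_eraseIdx {α β : Type} (l : List α) (f : α → β) (k : Nat) :
    (l.eraseIdx k).map f = (l.map f).eraseIdx k := by
  simp [pv_eraseIdx_eq_take_drop, List.map_take, List.map_drop]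

lemma pv_not_mem_eraseIdx {α : Type} (l : List α) (hl : l.Nodup) (k : Nat)
    (hk : k < l.length) : l[k] ∉ l.eraseIdx k := by
  have hs := pv_split l hl k hk
  rw [pv_eraseIdx_eq_take_drop]
  simp [hs.1, hs.2]

lemma pv_map_set {α β : Type} (l : List α) (hl : l.Nodup) (k : Nat) (hk : k < l.length)
    (f g : α → β) (hoff : ∀ x ∈ l, x ≠ l[k] → g x = f x) :
    l.map g = (l.map f).set k (g l[k]) := by
  apply List.ext_getElem (by simp)
  intro i h1 h2
  simp only [List.getElem_map, List.getElem_set]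
  by_cases hik : i = k
  · simp [hik]
  · rw [if_neg (fun h => hik h.symm), hoff _ (l.getElem_mem _)]
    intro he
    exact hik ((List.Nodup.getElem_inj_iff hl).mp he)

lemma pv_filter_flip_false {α : Type} [DecidableEq α] (l : List α) (a : α) (p p' : α → Bool)
    (hl : l.Nodup) (ha : a ∈ l) (hpa : p a = true) (hpa' : p' a = false)
    (hoff : ∀ x ∈ l, x ≠ a → p' x = p x) :
    l.filter p' = (l.filter p).erase a := by
  induction l with
  | nil => simp at ha
  | cons x t ih =>
    by_cases hx : x = a
    · subst hx
      have hxt : x ∉ t := (List.nodup_cons.mp hl).1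
      have : t.filter p' = t.filter p := by
        apply List.filter_congr
        intro y hy
        exact hoff y (List.mem_cons_of_mem _ hy) (fun he => hxt (he ▸ hy))
      simp [hpa, hpa', this, List.erase_cons_head]
    · have hat : a ∈ t := by
        rcases List.mem_cons.mp ha with h | h
        · exact absurd h.symm hx
        · exact h
      have hrec := ih (List.nodup_cons.mp hl).2 hat
        (fun y hy hne => hoff y (List.mem_cons_of_mem _ hy) hne)
      have hpx : p' x = p x := hoff x List.mem_cons_self hx
      by_cases hpxv : p x = true
      · simp [hpx, hpxv, hrec, List.erase_cons_tail,
          (by simpa using hx : ¬ (x == a) = true)]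
      · simp at hpxv
        simp [hpx, hpxv, hrec]

lemma pv_filter_flip_true {α : Type} (l : List α) (a : α) (p p' : α → Bool)
    (hl : l.Nodup) (ha : a ∈ l) (hpa : p a = false) (hpa' : p' a = true)
    (hoff : ∀ x ∈ l, x ≠ a → p' x = p x) :
    (l.filter p').Perm (a :: l.filter p) := by
  induction l with
  | nil => simp at ha
  | cons x t ih =>
    by_cases hx : x = a
    · subst hx
      have hxt : x ∉ t := (List.nodup_cons.mp hl).1
      have : t.filter p' = t.filter p := by
        apply List.filter_congr
        intro y hy
        exact hoff y (List.mem_cons_of_mem _ hy) (fun he => hxt (he ▸ hy))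
      simp [hpa, hpa', this]
    · have hat : a ∈ t := by
        rcases List.mem_cons.mp ha with h | h
        · exact absurd h.symm hx
        · exact h
      have hrec := ih (List.nodup_cons.mp hl).2 hat
        (fun y hy hne => hoff y (List.mem_cons_of_mem _ hy) hne)
      have hpx : p' x = p x := hoff x List.mem_cons_self hx
      by_cases hpxv : p x = true
      · simp only [List.filter_cons, hpx, hpxv, if_true]
        exact (hrec.cons x).trans (List.Perm.swap a x _)
      · simp at hpxv
        simpa [List.filter_cons, hpx, hpxv] using hrec
    
lemma pv_sum_flip (l : List Nat) (a : Nat) (g g' : Nat → Nat)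
    (hl : l.Nodup) (ha : a ∈ l) (hga : g a = g' a + 1)
    (hoff : ∀ x ∈ l, x ≠ a → g' x = g x) :
    (l.map g).sum = (l.map g').sum + 1 := by
  induction l with
  | nil => simp at ha
  | cons x t ih =>
    by_cases hx : x = a
    · subst hx
      have hxt : x ∉ t := (List.nodup_cons.mp hl).1
      have : t.map g' = t.map g := by
        apply List.map_congr_left
        intro y hy
        exact hoff y (List.mem_cons_of_mem _ hy) (fun he => hxt (he ▸ hy))
      simp [this, hga]
      omega
    · have hat : a ∈ t := by
        rcases List.mem_cons.mp ha with h | h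
        · exact absurd h.symm hx
        · exact h
      have hrec := ih (List.nodup_cons.mp hl).2 hat
        (fun y hy hne => hoff y (List.mem_cons_of_mem _ hy) hne)
      have hpx : g' x = g x := hoff x List.mem_cons_self hx
      simp [hrec, hpx]
      omega

lemma pv_map_getD_range {α : Type} (l : List α) (d : α) :
    (List.range l.length).map (fun j => l.getD j d) = l := by
  apply List.ext_getElem (by simp)
  intro i h1 h2
  simp [List.getD_eq_getElem?_getD, List.getElem?_eq_getElem h2]

lemma pv_getD_set (l : List Int) (a j : Nat) (v : Int) (ha : a < l.length) :
    (l.set a v).getD j 0 = if j = a then v else l.getD j 0 := by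
  by_cases hj : j < l.length
  · by_cases hja : j = a
    · simp [hja, List.getD_eq_getElem?_getD, List.getElem?_set_self ha]
    · simp [List.getD_eq_getElem?_getD, List.getElem?_set_ne (by omega : a ≠ j), hja]
  · have : ¬ j < (l.set a v).length := by simpa using hj
    rw [List.getD_eq_getElem?_getD, List.getD_eq_getElem?_getD,
      List.getElem?_eq_none (by omega), List.getElem?_eq_none (by omega)]
    simp
    omega

-- ----- selection: both ports compute min? over the unfinished jobs -----

-- the shared left-fold step behind Python min(): first strict minimum wins
def pvStep {α : Type} (f : α → Int) (acc : Option α) (x : α) : Option α :=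
  match acc with
  | none => some x
  | some m => if f x < f m then some x else some m

-- A's scan step: (earliest, chosen) accumulator; earliest = none is float('inf')
def pvScanStep (f : Nat → Int) (acc : Option Int × Int) (j : Nat) : Option Int × Int :=
  match acc.1 with
  | none => (some (f j), (j : Int))
  | some e => if f j < e then (some (f j), (j : Int)) else acc

lemma pv_min?_eq_foldl {α : Type} (l : List α) (f : α → Int) :
    PySem.List.min? l f = l.foldl (pvStep f) none := by
  unfold PySem.List.min? pvStep
  congr

lemma pv_min_congr_aux {α : Type} (f g : α → Int) :
    ∀ (l : List α) (acc : Option α), (∀ x ∈ l, f x = g x) →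
      (∀ m, acc = some m → f m = g m) →
      l.foldl (pvStep f) acc = l.foldl (pvStep g) acc := by
  intro l
  induction l with
  | nil => intro acc _ _; rfl
  | cons x t ih =>
    intro acc hl hacc
    have hx : f x = g x := hl x List.mem_cons_self
    have htl : ∀ y ∈ t, f y = g y := fun y hy => hl y (List.mem_cons_of_mem _ hy)
    cases acc with
    | none =>
      exact ih (some x) htl (fun m hm => by cases hm; exact hx)
    | some m =>
      have hm := hacc m rfl
      rw [List.foldl_cons, List.foldl_cons]
      show t.foldl _ (if f x < f m then some x else some m)
        = t.foldl _ (if g x < g m then some x else some m)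
      rw [hx, hm]
      by_cases hcmp : g x < g m
      · rw [if_pos hcmp]
        exact ih (some x) htl (fun m' hm' => by cases hm'; exact hx)
      · rw [if_neg hcmp]
        exact ih (some m) htl (fun m' hm' => by cases hm'; exact hm)

lemma pv_min?_congr {α : Type} (l : List α) (f g : α → Int)
    (h : ∀ x ∈ l, f x = g x) : PySem.List.min? l f = PySem.List.min? l g := by
  rw [pv_min?_eq_foldl, pv_min?_eq_foldl]
  exact pv_min_congr_aux f g l none h (by simp)

lemma pv_min_map_aux {α β : Type} (φ : α → β) (f : β → Int) :
    ∀ (l : List α) (o : Option α),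
      (l.map φ).foldl (pvStep f) (Option.map φ o)
      = Option.map φ (l.foldl (pvStep (fun x => f (φ x))) o) := by
  intro l
  induction l with
  | nil => intro o; rfl
  | cons x t ih =>
    intro o
    rw [List.map_cons, List.foldl_cons, List.foldl_cons]
    have step : pvStep f (Option.map φ o) (φ x)
        = Option.map φ (pvStep (fun y => f (φ y)) o x) := by
      cases o with
      | none => rfl
      | some m =>
        show (if f (φ x) < f (φ m) then some (φ x) else some (φ m))
          = Option.map φ (if f (φ x) < f (φ m) then some x else some m)
        split_ifs <;> rfl
    rw [step]
    exact ih _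

lemma pv_min?_map {α β : Type} (l : List α) (φ : α → β) (f : β → Int) :
    PySem.List.min? (l.map φ) f = Option.map φ (PySem.List.min? l (fun x => f (φ x))) := by
  rw [pv_min?_eq_foldl, pv_min?_eq_foldl]
  exact pv_min_map_aux φ f l none

lemma pv_scan_min_aux (f : Nat → Int) :
    ∀ (l : List Nat) (o : Option Nat),
      l.foldl (pvScanStep f)
        (match o with
          | none => ((none : Option Int), (-1 : Int))
          | some m => (some (f m), (m : Int)))
      = (match l.foldl (pvStep f) o with
        | none => ((none : Option Int), (-1 : Int))
        | some m => (some (f m), (m : Int))) := by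
  intro l
  induction l with
  | nil => intro o; rfl
  | cons x t ih =>
    intro o
    rw [List.foldl_cons, List.foldl_cons]
    have step : pvScanStep f (match o with
          | none => ((none : Option Int), (-1 : Int))
          | some m => (some (f m), (m : Int))) x
      = (match pvStep f o x with
          | none => ((none : Option Int), (-1 : Int))
          | some m => (some (f m), (m : Int))) := by
      cases o with
      | none => rfl
      | some m =>
        show (if f x < f m then (some (f x), (x : Int)) else (some (f m), (m : Int)))
          = (match (if f x < f m then some x else some m : Option Nat) with
              | none => ((none : Option Int), (-1 : Int))
              | some m => (some (f m), (m : Int)))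
        split_ifs <;> rfl
    rw [step]
    exact ih _

lemma pv_scan_min (f : Nat → Int) (l : List Nat) :
    l.foldl (pvScanStep f) ((none : Option Int), (-1 : Int))
    = match PySem.List.min? l f with
      | none => ((none : Option Int), (-1 : Int))
      | some m => (some (f m), (m : Int)) := by
  rw [pv_min?_eq_foldl]
  exact pv_scan_min_aux f l none

-- A's literal per-job key
def pvKeyA (jobs : List (List (Int × Int))) (mt jt oi : List Int) (j : Nat) : Int :=
  max (PySem.List.pyGetD mt
        (PySem.List.pyGetD (PySem.List.pyGetD jobs (j : Int) [])
          (PySem.List.pyGetD oi (j : Int) 0) (0, 0)).1 0)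
      (PySem.List.pyGetD jt (j : Int) 0)

lemma pv_aScan_eq (jobs : List (List (Int × Int))) (mt jt oi : List Int) :
    aScan jobs mt jt oi (pvP jobs : Int) (jobs.length : Int)
    = match PySem.List.min? (pvU jobs oi) (pvKeyA jobs mt jt oi) with
      | none => ((none : Option Int), (-1 : Int))
      | some m => (some (pvKeyA jobs mt jt oi m), (m : Int)) := by
  unfold aScan
  rw [PySem.List.pyRange_zero_nat, List.foldl_map, PySem.List.foldl_ite_eq_foldl_filter]
  have hU : (List.range jobs.length).filter
      (fun j : Nat => decide (PySem.List.pyGetD oi (j : Int) 0 < ((pvP jobs : Nat) : Int)))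
      = pvU jobs oi := by
    unfold pvU
    apply List.filter_congr
    intro x _
    simp
  rw [hU]
  refine Eq.trans (PySem.List.foldl_congr_mem _ _ (pvScanStep (pvKeyA jobs mt jt oi)) _ ?_)
    (pv_scan_min _ _)
  intro acc x _
  rcases acc with ⟨a1, a2⟩
  cases a1 <;> rfl

-- the head of an unfinished job's remaining-ops list is its current operation
lemma pv_entry_snd (jobs : List (List (Int × Int))) (jt oi : List Int) (j : Nat)
    (hlen : pvP jobs ≤ (jobs.getD j []).length)
    (h0 : 0 ≤ oi.getD j 0) (hP : oi.getD j 0 < (pvP jobs : Int)) :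
    (pvEntry jobs jt oi j).2
      = (jobs.getD j []).getD (oi.getD j 0).toNat (0, 0)
        :: ((jobs.getD j []).take (pvP jobs)).drop ((oi.getD j 0).toNat + 1) := by
  unfold pvEntry
  have htP : (oi.getD j 0).toNat < pvP jobs := by omega
  have hlt : (oi.getD j 0).toNat < ((jobs.getD j []).take (pvP jobs)).length := by
    rw [List.length_take]
    omega
  simp only
  rw [← List.getElem_cons_drop hlt]
  congr 1
  rw [List.getElem_take]
  conv_rhs => rw [List.getD_eq_getElem?_getD]
  rw [List.getElem?_eq_getElem (by omega : (oi.getD j 0).toNat < (jobs.getD j []).length)]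
  rfl

lemma pv_key_agree (jobs : List (List (Int × Int))) (mt jt oi : List Int)
    (hlen : ∀ job ∈ jobs, pvP jobs ≤ job.length)
    (hinv : ∀ j, j < jobs.length → 0 ≤ oi.getD j 0 ∧ oi.getD j 0 ≤ (pvP jobs : Int)) :
    ∀ j ∈ pvU jobs oi, pvKeyA jobs mt jt oi j = pvKey jobs mt jt oi j := by
  intro j hj
  unfold pvU at hj
  rw [List.mem_filter, List.mem_range] at hj
  obtain ⟨hjN, hdec⟩ := hj
  have hP : oi.getD j 0 < (pvP jobs : Int) := of_decide_eq_true hdec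
  have h0 : 0 ≤ oi.getD j 0 := (hinv j hjN).1
  have hmem : jobs.getD j [] ∈ jobs := by
    rw [List.getD_eq_getElem?_getD, List.getElem?_eq_getElem hjN]
    exact List.getElem_mem _
  have hlenj : pvP jobs ≤ (jobs.getD j []).length := hlen _ hmem
  unfold pvKeyA pvKey
  rw [pv_entry_snd jobs jt oi j hlenj h0 hP]
  simp only [List.headD_cons, PySem.List.pyGetD_natCast]
  congr 2
  rw [PySem.List.pyGetD_eq_getElem _ _ h0 (by omega)]
  conv_rhs => rw [List.getD_eq_getElem?_getD]
  rw [List.getElem?_eq_getElem (by omega : (oi.getD j 0).toNat < (jobs.getD j []).length)]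
  rfl

lemma pv_bSel (jobs : List (List (Int × Int))) (mt jt oi : List Int) :
    PySem.List.min? (PySem.List.pyRange 0 (PySem.List.len (pvPend jobs jt oi)) 1)
        (bKey mt (pvPend jobs jt oi))
    = Option.map (fun (k : Nat) => (k : Int))
        (PySem.List.min? (List.range (pvU jobs oi).length)
          (fun k => pvKey jobs mt jt oi ((pvU jobs oi).getD k 0))) := by
  have hlenp : PySem.List.len (pvPend jobs jt oi) = (((pvU jobs oi).length : Nat) : Int) := by
    simp [PySem.List.len_eq, pvPend]
  rw [hlenp, PySem.List.pyRange_zero_nat, pv_min?_map]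
  congr 1
  apply pv_min?_congr
  intro k hk
  rw [List.mem_range] at hk
  unfold bKey
  rw [PySem.List.pyGetD_natCast]
  have hentry : (pvPend jobs jt oi).getD k (0, []) = pvEntry jobs jt oi ((pvU jobs oi).getD k 0) := by
    unfold pvPend
    rw [List.getD_eq_getElem?_getD, List.getElem?_map,
      List.getElem?_eq_getElem (by simpa using hk : k < (pvU jobs oi).length)]
    simp
    congr 1
    rw [List.getElem?_eq_getElem hk]
    rfl
  rw [hentry]
  rfl

lemma pv_eraseIdx_eq_erase {α : Type} [DecidableEq α] (l : List α) (hl : l.Nodup)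
    (k : Nat) (hk : k < l.length) : l.eraseIdx k = l.erase l[k] := by
  have hs := pv_split l hl k hk
  obtain ⟨a, ha⟩ : ∃ a, l[k] = a := ⟨_, rfl⟩
  rw [ha] at hs ⊢
  rw [pv_eraseIdx_eq_take_drop]
  conv_rhs => rw [pv_decomp l k hk, ha]
  rw [List.erase_append_right _ hs.1, List.erase_cons_head]

lemma pv_U_nodup (jobs : List (List (Int × Int))) (oi : List Int) : (pvU jobs oi).Nodup :=
  (List.nodup_range).filter _

lemma pv_mem_U (jobs : List (List (Int × Int))) (oi : List Int) (j : Nat) :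
    j ∈ pvU jobs oi ↔ j < jobs.length ∧ oi.getD j 0 < (pvP jobs : Int) := by
  unfold pvU
  rw [List.mem_filter, List.mem_range]
  simp

-- ----- the lockstep simulation -----

lemma pv_main (jobs : List (List (Int × Int)))
    (hlen : ∀ job ∈ jobs, pvP jobs ≤ job.length) :
    ∀ (fuel : Nat) (mt jt oi comps : List Int),
      oi.length = jobs.length → jt.length = jobs.length →
      (∀ j, j < jobs.length → 0 ≤ oi.getD j 0 ∧ oi.getD j 0 ≤ (pvP jobs : Int)) →
      fuel = pvRem jobs oi →
      comps.Perm (pvFinVals jobs jt oi) →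
      (bLoop mt (pvPend jobs jt oi) comps).Perm
        (aLoop jobs (pvP jobs : Int) (jobs.length : Int) fuel mt jt oi) := by
  intro fuel
  induction fuel with
  | zero =>
    intro mt jt oi comps hoiL hjtL hinv hfuel hcomps
    have hdone : ∀ j ∈ List.range jobs.length, ¬ (decide (oi.getD j 0 < (pvP jobs : Int)) = true) := by
      intro j hj
      rw [List.mem_range] at hj
      have hz : pvP jobs - (oi.getD j 0).toNat = 0 := by
        have := (List.sum_eq_zero_iff.mp hfuel.symm) (pvP jobs - (oi.getD j 0).toNat)
          (List.mem_map.mpr ⟨j, List.mem_range.mpr hj, rfl⟩)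
        exact this
      have h0 := (hinv j hj).1
      simp only [decide_eq_true_eq]
      omega
    have hU : pvU jobs oi = [] := List.filter_eq_nil_iff.mpr hdone
    have hpend : pvPend jobs jt oi = [] := by unfold pvPend; rw [hU]; rfl
    have hF : pvF jobs oi = List.range jobs.length := by
      unfold pvF
      apply List.filter_eq_self.mpr
      intro j hj
      simp only [Bool.not_eq_eq_eq_not, Bool.not_true]
      exact Bool.not_eq_true _ ▸ (by simpa using hdone j hj)
    have hfv : pvFinVals jobs jt oi = jt := by
      unfold pvFinVals
      rw [hF, ← hjtL, pv_map_getD_range]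
    rw [hpend, bLoop]
    simp only [List.isEmpty_nil, if_true]
    show comps.Perm jt
    rw [← hfv]
    exact hcomps
  | succ fuel ih =>
    intro mt jt oi comps hoiL hjtL hinv hfuel hcomps
    -- the unfinished set is nonempty
    have hUne : pvU jobs oi ≠ [] := by
      intro hU
      have hall : ∀ j ∈ List.range jobs.length, ¬ (decide (oi.getD j 0 < (pvP jobs : Int)) = true) :=
        List.filter_eq_nil_iff.mp hU
      have hz : pvRem jobs oi = 0 := by
        unfold pvRem
        apply List.sum_eq_zero_iff.mpr
        intro x hx
        rw [List.mem_map] at hx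
        obtain ⟨j, hj, hxe⟩ := hx
        have := hall j hj
        have h0 := (hinv j (List.mem_range.mp hj)).1
        simp only [decide_eq_true_eq] at this
        omega
      omega
    -- selection: both sides pick position k* in pending / job js
    rcases hsel : PySem.List.min? (List.range (pvU jobs oi).length)
        (fun k => pvKey jobs mt jt oi ((pvU jobs oi).getD k 0)) with _ | ks
    · rw [PySem.List.min?_eq_none_iff] at hsel
      exact absurd (by simpa using congrArg List.length hsel) (by simpa using
        (fun h => hUne (List.length_eq_zero_iff.mp h)))
    have hks : ks < (pvU jobs oi).length := by
      have := PySem.List.min?_mem hsel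
      simpa using this
    -- the chosen job
    have hUeq : pvU jobs oi = (List.range (pvU jobs oi).length).map (fun k => (pvU jobs oi).getD k 0) :=
      (pv_map_getD_range _ 0).symm
    have hminU : PySem.List.min? (pvU jobs oi) (pvKey jobs mt jt oi)
        = some ((pvU jobs oi).getD ks 0) := by
      conv_lhs => rw [hUeq]
      rw [pv_min?_map, hsel]
      rfl
    have hjU : (pvU jobs oi).getD ks 0 ∈ pvU jobs oi := by
      rw [List.getD_eq_getElem?_getD, List.getElem?_eq_getElem hks]
      exact List.getElem_mem _
    have hjmem := (pv_mem_U jobs oi _).mp hjU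
    have hjN : (pvU jobs oi).getD ks 0 < jobs.length := hjmem.1
    have hjP : oi.getD ((pvU jobs oi).getD ks 0) 0 < (pvP jobs : Int) := hjmem.2
    have hj0 : 0 ≤ oi.getD ((pvU jobs oi).getD ks 0) 0 := (hinv _ hjN).1
    have hrowmem : jobs.getD ((pvU jobs oi).getD ks 0) [] ∈ jobs := by
      rw [List.getD_eq_getElem?_getD, List.getElem?_eq_getElem hjN]
      exact List.getElem_mem _
    have hrowlen : pvP jobs ≤ (jobs.getD ((pvU jobs oi).getD ks 0) []).length := hlen _ hrowmem
    obtain ⟨js, hjsdef⟩ : ∃ x, (pvU jobs oi).getD ks 0 = x := ⟨_, rfl⟩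
    rw [hjsdef] at hminU hjU hjN hjP hj0 hrowmem hrowlen
    obtain ⟨t, htdef⟩ : ∃ n, (oi.getD js 0).toNat = n := ⟨_, rfl⟩
    have htv : oi.getD js 0 = (t : Int) := by omega
    have htP : t < pvP jobs := by omega
    -- the scheduled operation, remaining tail, finish time, and updated state
    obtain ⟨opj, hopj⟩ : ∃ x, (jobs.getD js []).getD t (0, 0) = x := ⟨_, rfl⟩
    obtain ⟨restj, hrestj⟩ : ∃ x, ((jobs.getD js []).take (pvP jobs)).drop (t + 1) = x := ⟨_, rfl⟩
    obtain ⟨finv, hfinv⟩ : ∃ x, max (PySem.List.pyGetD mt opj.1 0) (jt.getD js 0) + opj.2 = x := ⟨_, rfl⟩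
    have hrestlen : restj.length = pvP jobs - (t + 1) := by
      rw [← hrestj, List.length_drop, List.length_take]
      omega
    have hUelem : (pvU jobs oi)[ks] = js := by
      rw [← hjsdef, List.getD_eq_getElem?_getD, List.getElem?_eq_getElem hks]
      rfl
    -- A's step: scan = argmin, chosen = js
    have hA : aLoop jobs (pvP jobs : Int) (jobs.length : Int) (fuel + 1) mt jt oi
        = aLoop jobs (pvP jobs : Int) (jobs.length : Int) fuel
            (PySem.List.pySetD mt opj.1 finv) (jt.set js finv) (oi.set js (oi.getD js 0 + 1)) := by
      simp only [aLoop]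
      rw [pv_aScan_eq, pv_min?_congr _ _ _ (pv_key_agree jobs mt jt oi hlen hinv), hminU]
      simp only [PySem.List.pyGetD_natCast, PySem.List.pySetD_natCast]
      have hop : PySem.List.pyGetD (jobs.getD js []) (oi.getD js 0) (0, 0) = opj := by
        rw [PySem.List.pyGetD_eq_getElem _ _ hj0
          (by rw [htv]; exact_mod_cast (by omega : t < (jobs.getD js []).length))]
        simp only [htdef]
        rw [← hopj]
        conv_rhs => rw [List.getD_eq_getElem?_getD]
        rw [List.getElem?_eq_getElem (by omega)]
        rfl
      rw [hop, hfinv]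
    -- B's step: pop position ks
    have hne : ¬ (pvPend jobs jt oi).isEmpty = true := by
      simp [pvPend, hUne]
    have hkslen : ks < (pvPend jobs jt oi).length := by
      simpa [pvPend] using hks
    have hi : (PySem.List.min? (PySem.List.pyRange 0 (PySem.List.len (pvPend jobs jt oi)) 1)
        (bKey mt (pvPend jobs jt oi))).getD 0 = ((ks : Nat) : Int) := by
      rw [pv_bSel, hsel]
      rfl
    have hgetD : (pvPend jobs jt oi).getD ks (0, []) = (jt.getD js 0, opj :: restj) := by
      unfold pvPend
      rw [List.getD_eq_getElem?_getD, List.getElem?_map, List.getElem?_eq_getElem hks]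
      simp only [Option.map_some, Option.getD_some, hUelem]
      have h2 := pv_entry_snd jobs jt oi js hrowlen hj0 hjP
      rw [htdef, hrestj, hopj] at h2
      exact congrArg (fun x => (jt.getD js 0, x)) h2
    have hB : bLoop mt (pvPend jobs jt oi) comps
        = if restj.isEmpty then
            bLoop (PySem.List.pySetD mt opj.1 finv) ((pvPend jobs jt oi).eraseIdx ks) (comps ++ [finv])
          else
            bLoop (PySem.List.pySetD mt opj.1 finv) ((pvPend jobs jt oi).set ks (finv, restj)) comps := by
      rw [bLoop, if_neg hne]
      simp only [hi, Int.toNat_natCast]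
      rw [dif_pos hkslen]
      simp only [hgetD, List.isEmpty_cons, List.headD_cons, List.tail_cons, List.length_cons]
      rw [dif_neg (by simp)]
      simp only [hfinv]
      cases restj with
      | nil => simp
      | cons a l => simp
    rw [hA, hB]
    -- shared facts about the updated state
    have hjsoiL : js < oi.length := by omega
    have hjsjtL : js < jt.length := by omega
    have hinv' : ∀ j, j < jobs.length →
        0 ≤ (oi.set js (oi.getD js 0 + 1)).getD j 0 ∧
          (oi.set js (oi.getD js 0 + 1)).getD j 0 ≤ (pvP jobs : Int) := by
      intro j hj
      rw [pv_getD_set oi js j _ hjsoiL]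
      split_ifs with hjj
      · omega
      · exact hinv j hj
    have hoiL' : (oi.set js (oi.getD js 0 + 1)).length = jobs.length := by simp [hoiL]
    have hjtL' : (jt.set js finv).length = jobs.length := by simp [hjtL]
    have hrem' : fuel = pvRem jobs (oi.set js (oi.getD js 0 + 1)) := by
      have hflip := pv_sum_flip (List.range jobs.length) js
        (fun j => pvP jobs - (oi.getD j 0).toNat)
        (fun j => pvP jobs - ((oi.set js (oi.getD js 0 + 1)).getD j 0).toNat)
        List.nodup_range (List.mem_range.mpr hjN)
        (by beta_reduce; rw [pv_getD_set oi js js _ hjsoiL, if_pos rfl]; omega)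
        (fun x _ hxne => by beta_reduce; rw [pv_getD_set oi js x _ hjsoiL, if_neg hxne])
      unfold pvRem at hfuel ⊢
      omega
    by_cases hlast : t + 1 = pvP jobs
    · -- the chosen job finishes: its entry leaves the worklist, its completion is recorded
      have hrestnil : restj = [] := List.length_eq_zero_iff.mp (by omega)
      rw [if_pos (by rw [hrestnil]; rfl)]
      have hU' : pvU jobs (oi.set js (oi.getD js 0 + 1)) = (pvU jobs oi).eraseIdx ks := by
        have h1 := pv_filter_flip_false (List.range jobs.length) js
          (fun j => decide (oi.getD j 0 < (pvP jobs : Int)))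
          (fun j => decide ((oi.set js (oi.getD js 0 + 1)).getD j 0 < (pvP jobs : Int)))
          List.nodup_range (List.mem_range.mpr hjN)
          (by beta_reduce; exact decide_eq_true hjP)
          (by beta_reduce
              rw [pv_getD_set oi js js _ hjsoiL, if_pos rfl]
              exact decide_eq_false (by omega))
          (fun x _ hxne => by beta_reduce; rw [pv_getD_set oi js x _ hjsoiL, if_neg hxne])
        have h2 : (pvU jobs oi).eraseIdx ks = (pvU jobs oi).erase js := by
          rw [pv_eraseIdx_eq_erase _ (pv_U_nodup jobs oi) ks hks, hUelem]
        have h1' : pvU jobs (oi.set js (oi.getD js 0 + 1)) = (pvU jobs oi).erase js := h1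
        rw [h1', h2]
      have hjs_not : js ∉ (pvU jobs oi).eraseIdx ks := by
        have := pv_not_mem_eraseIdx _ (pv_U_nodup jobs oi) ks hks
        rwa [hUelem] at this
      have hpend' : pvPend jobs (jt.set js finv) (oi.set js (oi.getD js 0 + 1))
          = (pvPend jobs jt oi).eraseIdx ks := by
        unfold pvPend
        rw [hU', List.map_congr_left (fun x hx => ?_), pv_map_eraseIdx]
        have hxne : x ≠ js := fun he => hjs_not (he ▸ hx)
        unfold pvEntry
        rw [pv_getD_set jt js x finv hjsjtL, if_neg hxne,
          pv_getD_set oi js x _ hjsoiL, if_neg hxne]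
      have hflipF := pv_filter_flip_true (List.range jobs.length) js
        (fun j => !decide (oi.getD j 0 < (pvP jobs : Int)))
        (fun j => !decide ((oi.set js (oi.getD js 0 + 1)).getD j 0 < (pvP jobs : Int)))
        List.nodup_range (List.mem_range.mpr hjN)
        (by beta_reduce; rw [decide_eq_true hjP]; rfl)
        (by beta_reduce
            rw [pv_getD_set oi js js _ hjsoiL, if_pos rfl, decide_eq_false (by omega)]
            rfl)
        (fun x _ hxne => by beta_reduce; rw [pv_getD_set oi js x _ hjsoiL, if_neg hxne])
      have hfin' : (comps ++ [finv]).Perm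
          (pvFinVals jobs (jt.set js finv) (oi.set js (oi.getD js 0 + 1))) := by
        unfold pvFinVals pvF
        refine ((List.perm_append_singleton finv comps).trans ?_).trans
          ((hflipF.map (fun j => (jt.set js finv).getD j 0)).symm)
        rw [List.map_cons,
          show (jt.set js finv).getD js 0 = finv from by
            rw [pv_getD_set jt js js finv hjsjtL, if_pos rfl]]
        refine List.Perm.cons finv ?_
        rw [List.map_congr_left (g := fun j => jt.getD j 0) (fun x hx => ?_)]
        · exact hcomps
        · have hxne : x ≠ js := by
            intro he
            subst he
            rw [List.mem_filter, decide_eq_true hjP] at hx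
            simp at hx
          rw [pv_getD_set jt js x finv hjsjtL, if_neg hxne]
      rw [← hpend']
      exact ih _ _ _ _ hoiL' hjtL' hinv' hrem' hfin'
    · -- the chosen job continues: its entry is updated in place
      have hrestne : restj ≠ [] := by
        intro he
        rw [he] at hrestlen
        simp at hrestlen
        omega
      rw [if_neg (by simpa using hrestne)]
      have hU' : pvU jobs (oi.set js (oi.getD js 0 + 1)) = pvU jobs oi := by
        unfold pvU
        apply List.filter_congr
        intro x _
        rw [pv_getD_set oi js x _ hjsoiL]
        split_ifs with hxj
        · subst hxj
          simp only [decide_eq_decide]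
          omega
        · rfl
      have hpend' : pvPend jobs (jt.set js finv) (oi.set js (oi.getD js 0 + 1))
          = (pvPend jobs jt oi).set ks (finv, restj) := by
        unfold pvPend
        rw [hU', pv_map_set (pvU jobs oi) (pv_U_nodup jobs oi) ks hks
          (pvEntry jobs jt oi) (pvEntry jobs (jt.set js finv) (oi.set js (oi.getD js 0 + 1)))
          (fun x hx hxne => ?_), hUelem]
        · congr 1
          unfold pvEntry
          rw [pv_getD_set jt js js finv hjsjtL, if_pos rfl,
            pv_getD_set oi js js _ hjsoiL, if_pos rfl, htv,
            show ((t : Int) + 1).toNat = t + 1 from by omega, hrestj]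
        · have hxne' : x ≠ js := by rwa [hUelem] at hxne
          unfold pvEntry
          rw [pv_getD_set jt js x finv hjsjtL, if_neg hxne',
            pv_getD_set oi js x _ hjsoiL, if_neg hxne']
      have hfv' : pvFinVals jobs (jt.set js finv) (oi.set js (oi.getD js 0 + 1))
          = pvFinVals jobs jt oi := by
        unfold pvFinVals pvF
        have hFcong : (List.range jobs.length).filter
              (fun j => !decide ((oi.set js (oi.getD js 0 + 1)).getD j 0 < (pvP jobs : Int)))
            = (List.range jobs.length).filter
              (fun j => !decide (oi.getD j 0 < (pvP jobs : Int))) := by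
          apply List.filter_congr
          intro x _
          rw [pv_getD_set oi js x _ hjsoiL]
          split_ifs with hxj
          · subst hxj
            rw [decide_eq_true (by omega : oi.getD x 0 + 1 < (pvP jobs : Int)),
              decide_eq_true hjP]
          · rfl
        rw [hFcong]
        apply List.map_congr_left
        intro x hx
        have hxne : x ≠ js := by
          intro he
          subst he
          rw [List.mem_filter, decide_eq_true hjP] at hx
          simp at hx
        rw [pv_getD_set jt js x finv hjsjtL, if_neg hxne]
      rw [← hpend']
      exact ih _ _ _ _ hoiL' hjtL' hinv' hrem' (hfv' ▸ hcomps)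

lemma pv_max_getD_perm (l l' : List Int) (h : l.Perm l') :
    (PySem.List.max? l (fun x => x)).getD 0 = (PySem.List.max? l' (fun x => x)).getD 0 := by
  rcases hm : PySem.List.max? l (fun x => x) with _ | m
  · rw [PySem.List.max?_eq_none_iff] at hm
    subst hm
    rw [List.nil_perm] at h
    subst h
    rfl
  · rcases hm' : PySem.List.max? l' (fun x => x) with _ | m'
    · rw [PySem.List.max?_eq_none_iff] at hm'
      subst hm'
      rw [List.perm_nil] at h
      subst h
      have h0 : PySem.List.max? ([] : List Int) (fun x => x) = none := by
        rw [PySem.List.max?_eq_none_iff]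
      rw [h0] at hm
      cases hm
    · have h1 : m ∈ l := PySem.List.max?_mem hm
      have h2 : m' ∈ l' := PySem.List.max?_mem hm'
      have h3 := PySem.List.max?_isMax hm m' (h.mem_iff.mpr h2)
      have h4 := PySem.List.max?_isMax hm' m (h.mem_iff.mp h1)
      simp at h3 h4 ⊢
      omega

lemma pv_getD_replicate (n j : Nat) : (List.replicate n (0 : Int)).getD j 0 = 0 := by
  rw [List.getD_eq_getElem?_getD, List.getElem?_replicate]
  split_ifs <;> rfl

lemma pv_map_getD_range' {α : Type} (l : List α) (d : α) (n : Nat) (hn : l.length = n) :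
    (List.range n).map (fun j => l.getD j d) = l := by
  subst hn
  exact pv_map_getD_range l d

lemma pv_len0 (jobs : List (List (Int × Int))) :
    (PySem.List.pyGetD jobs 0 []).length = pvP jobs := by
  rw [PySem.List.pyGetD_zero]
  cases jobs <;> rfl

lemma pv_rem0 (jobs : List (List (Int × Int))) :
    pvRem jobs (List.replicate jobs.length (0 : Int)) = jobs.length * pvP jobs := by
  unfold pvRem
  rw [List.map_congr_left (fun j _ => by rw [pv_getD_replicate])]
  simp [List.map_const', mul_comm]

lemma pv_inv0 (jobs : List (List (Int × Int))) :
    ∀ j, j < jobs.length → 0 ≤ (List.replicate jobs.length (0 : Int)).getD j 0 ∧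
      (List.replicate jobs.length (0 : Int)).getD j 0 ≤ (pvP jobs : Int) := by
  intro j _
  rw [pv_getD_replicate]
  constructor
  · omega
  · exact_mod_cast Nat.zero_le _

theorem drl_liu_heuristic_spec : Claim_equal_drl_liu_heuristic := by
  intro jobs n_machines _hdom hpre
  unfold Spec_drl_liu_heuristic
  obtain ⟨hne, hrows⟩ := hpre
  have hlen : ∀ job ∈ jobs, pvP jobs ≤ job.length := fun job hj => (hrows job hj).1
  unfold drl_liu_heuristic drl_liu_heuristic_alt
  simp only [PySem.List.len_eq, pv_len0]
  have hfuel : (((jobs.length : Nat) : Int) * ((pvP jobs : Nat) : Int)).toNat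
      = jobs.length * pvP jobs := by
    omega
  rw [hfuel]
  by_cases hP : pvP jobs = 0
  · -- every job is empty: nothing is scheduled, all completions are 0
    have hcond : ¬ (((pvP jobs : Nat) : Int) ≠ 0) := by simp [hP]
    have hinit : jobs.foldl (fun (acc : List (Int × List (Int × Int)) × List Int) ops =>
        if ((pvP jobs : Nat) : Int) ≠ 0 then
          (acc.1 ++ [(0, PySem.List.slice ops none (some ((pvP jobs : Nat) : Int)))], acc.2)
        else (acc.1, acc.2 ++ [(0 : Int)])) ([], [])
        = ([], List.replicate jobs.length (0 : Int)) := by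
      refine Eq.trans (PySem.List.foldl_congr_mem _ _
        (fun (acc : List (Int × List (Int × Int)) × List Int) (_ : List (Int × Int)) =>
          (acc.1, acc.2 ++ [(0 : Int)])) _
        (fun acc x _ => by rw [if_neg hcond])) ?_
      rw [PySem.List.foldl_prod_mk (f := fun (a : List (Int × List (Int × Int))) (_ : List (Int × Int)) => a)
        (g := fun (a : List Int) (_ : List (Int × Int)) => a ++ [(0 : Int)])]
      rw [PySem.List.foldl_ignore, PySem.List.foldl_append_singleton_eq_map]
      rw [List.nil_append, List.map_const']
    have hpend0 : pvPend jobs (List.replicate jobs.length (0 : Int))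
        (List.replicate jobs.length (0 : Int)) = [] := by
      unfold pvPend pvU
      rw [List.filter_eq_nil_iff.mpr (fun j _ => by
        rw [pv_getD_replicate, hP]
        simp)]
      rfl
    have hcomps0 : (List.replicate jobs.length (0 : Int)).Perm
        (pvFinVals jobs (List.replicate jobs.length (0 : Int))
          (List.replicate jobs.length (0 : Int))) := by
      unfold pvFinVals pvF
      rw [List.filter_eq_self.mpr (fun j _ => by
        rw [pv_getD_replicate, hP]
        simp)]
      rw [pv_map_getD_range' _ 0 _ (by simp)]
    have hmain := pv_main jobs hlen (jobs.length * pvP jobs)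
      (List.replicate n_machines.toNat 0)
      (List.replicate jobs.length 0) (List.replicate jobs.length 0)
      (List.replicate jobs.length 0)
      (by simp) (by simp) (pv_inv0 jobs) (by rw [pv_rem0]) hcomps0
    rw [hpend0] at hmain
    rw [hinit]
    exact (pv_max_getD_perm _ _ hmain).symm
  · have hcond : (((pvP jobs : Nat) : Int) ≠ 0) := by exact_mod_cast hP
    have hinit : jobs.foldl (fun (acc : List (Int × List (Int × Int)) × List Int) ops =>
        if ((pvP jobs : Nat) : Int) ≠ 0 then
          (acc.1 ++ [(0, PySem.List.slice ops none (some ((pvP jobs : Nat) : Int)))], acc.2)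
        else (acc.1, acc.2 ++ [(0 : Int)])) ([], [])
        = (jobs.map (fun ops => ((0 : Int), PySem.List.slice ops none (some ((pvP jobs : Nat) : Int)))),
           ([] : List Int)) := by
      refine Eq.trans (PySem.List.foldl_congr_mem _ _
        (fun (acc : List (Int × List (Int × Int)) × List Int) (ops : List (Int × Int)) =>
          (acc.1 ++ [((0 : Int), PySem.List.slice ops none (some ((pvP jobs : Nat) : Int)))], acc.2)) _
        (fun acc x _ => by rw [if_pos hcond])) ?_
      rw [PySem.List.foldl_prod_mk
        (f := fun (a : List (Int × List (Int × Int))) (ops : List (Int × Int)) =>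
          a ++ [((0 : Int), PySem.List.slice ops none (some ((pvP jobs : Nat) : Int)))])
        (g := fun (a : List Int) (_ : List (Int × Int)) => a)]
      rw [PySem.List.foldl_ignore, PySem.List.foldl_append_singleton_eq_map, List.nil_append]
    have hpend0 : pvPend jobs (List.replicate jobs.length (0 : Int))
        (List.replicate jobs.length (0 : Int))
        = jobs.map (fun ops => ((0 : Int), PySem.List.slice ops none (some ((pvP jobs : Nat) : Int)))) := by
      unfold pvPend pvU pvEntry
      rw [List.filter_eq_self.mpr (fun j _ => by
        rw [pv_getD_replicate]
        exact decide_eq_true (by exact_mod_cast Nat.pos_of_ne_zero hP))]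
      rw [List.map_congr_left (g := fun j => ((0 : Int), (jobs.getD j []).take (pvP jobs)))
        (fun j _ => by rw [pv_getD_replicate]; simp)]
      obtain ⟨P0, hP0⟩ : ∃ x, pvP jobs = x := ⟨_, rfl⟩
      rw [hP0]
      conv_rhs => rw [← pv_map_getD_range jobs ([] : List (Int × Int)), List.map_map]
      apply List.map_congr_left
      intro j _
      show ((0 : Int), (jobs.getD j []).take P0)
        = ((0 : Int), PySem.List.slice (jobs.getD j []) none (some ((P0 : Nat) : Int)))
      rw [PySem.List.slice_to_natCast]
    have hcomps0 : ([] : List Int).Perm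
        (pvFinVals jobs (List.replicate jobs.length (0 : Int))
          (List.replicate jobs.length (0 : Int))) := by
      have hfv : pvFinVals jobs (List.replicate jobs.length (0 : Int))
          (List.replicate jobs.length (0 : Int)) = [] := by
        unfold pvFinVals pvF
        rw [List.filter_eq_nil_iff.mpr (fun j _ => by
          rw [pv_getD_replicate,
            decide_eq_true (by exact_mod_cast Nat.pos_of_ne_zero hP : (0 : Int) < (pvP jobs : Int))]
          simp)]
        rfl
      rw [hfv]
    have hmain := pv_main jobs hlen (jobs.length * pvP jobs)
      (List.replicate n_machines.toNat 0)
      (List.replicate jobs.length 0) (List.replicate jobs.length 0) []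
      (by simp) (by simp) (pv_inv0 jobs) (by rw [pv_rem0]) hcomps0
    rw [hpend0] at hmain
    rw [hinit]
    exact (pv_max_getD_perm _ _ hmain).symm
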